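-- pv_equiv track=rewrite | github.com/GitMonsters/octotetrahedral-agi | arc-puzzle-catalog/re-arc/solves/07fa07f0/solver.py | transform
-- ===== SOURCE A (Python) =====
-- def transform(input_grid):
--     H = len(input_grid)
--     W = len(input_grid[0])
--
--     # Find background color (from uniform rows or columns)
--     bg = None
--     for r in range(H):
--         if len(set(input_grid[r])) == 1:
--             bg = input_grid[r][0]
--             break
--     if bg is None:
--         for c in range(W):
--             col_vals = [input_grid[r][c] for r in range(H)]
--             if len(set(col_vals)) == 1:
--                 bg = col_vals[0]
--                 break
--
--     # Find pattern region bounds (non-background cells)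
--     min_r, max_r = H, -1
--     min_c, max_c = W, -1
--     for r in range(H):
--         for c in range(W):
--             if input_grid[r][c] != bg:
--                 min_r = min(min_r, r)
--                 max_r = max(max_r, r)
--                 min_c = min(min_c, c)
--                 max_c = max(max_c, c)
--
--     # Find tile row period
--     tile_h = None
--     for period in range(1, max_r - min_r + 2):
--         match = True
--         for r in range(min_r, max_r + 1 - period):
--             for c in range(min_c, max_c + 1):
--                 if input_grid[r][c] != input_grid[r + period][c]:
--                     match = False
--                     break
--             if not match:
--                 break
--         if match:
--             tile_h = period
--             break
--
--     # Find tile column period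
--     tile_w = None
--     for period in range(1, max_c - min_c + 2):
--         match = True
--         for r in range(min_r, max_r + 1):
--             for c in range(min_c, max_c + 1 - period):
--                 if input_grid[r][c] != input_grid[r][c + period]:
--                     match = False
--                     break
--             if not match:
--                 break
--         if match:
--             tile_w = period
--             break
--
--     # Extract tile from pattern origin
--     tile = []
--     for r in range(tile_h):
--         row = []
--         for c in range(tile_w):
--             row.append(input_grid[min_r + r][min_c + c])
--         tile.append(row)
--
--     # Compute phase shift based on pattern origin position
--     r0, c0 = min_r, min_c
--     row_shift = ((-r0) % tile_w + (-c0) % tile_h) % tile_h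
--     col_shift = 0
--
--     # Generate output: tile the entire grid with the shifted phase
--     output = []
--     for r in range(H):
--         row = []
--         for c in range(W):
--             row.append(tile[(r + row_shift) % tile_h][(c + col_shift) % tile_w])
--         output.append(row)
--
--     return output
-- ===== SOURCE B (Python) =====
-- def _min_period(seq):
--     # KMP failure function: the minimal period of seq is len(seq) minus the
--     # length of its longest proper border (computed in linear time).
--     n = len(seq)
--     fail = [0]
--     k = 0
--     for i in range(1, n):
--         while k > 0 and seq[i] != seq[k]:
--             k = fail[k - 1]
--         if seq[i] == seq[k]:
--             k += 1
--         fail.append(k)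
--     return n - fail[n - 1]
--
--
-- def _background(input_grid):
--     # first uniform row's colour, else first uniform column's, else None
--     for row in input_grid:
--         if len(set(row)) == 1:
--             return row[0]
--     for c in range(len(input_grid[0])):
--         if len({row[c] for row in input_grid}) == 1:
--             return input_grid[0][c]
--     return None
--
--
-- def transform(input_grid):
--     H = len(input_grid)
--     W = len(input_grid[0])
--     bg = _background(input_grid)
--
--     # pattern bounds from per-row / per-column flags
--     rows_with = [r for r, row in enumerate(input_grid)
--                  if any(v != bg for v in row[:W])]
--     min_r, max_r = rows_with[0], rows_with[-1]
--     cols_with = [c for c in range(W)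
--                  if any(row[c] != bg for row in input_grid)]
--     min_c, max_c = cols_with[0], cols_with[-1]
--
--     # pattern region; periods via KMP on the row sequence / column sequence
--     region = [row[min_c:max_c + 1] for row in input_grid[min_r:max_r + 1]]
--     tile_h = _min_period(region)
--     cols = [[row[c] for row in region] for c in range(len(region[0]))]
--     tile_w = _min_period(cols)
--
--     # tile and phase shift
--     tile = [row[:tile_w] for row in region[:tile_h]]
--     row_shift = ((-min_r) % tile_w + (-min_c) % tile_h) % tile_h
--
--     # precompute one full-width row per phase, then assemble by reference
--     reps = W // tile_w + 1
--     phase = [(trow * reps)[:W] for trow in tile]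
--     return [list(phase[(r + row_shift) % tile_h]) for r in range(H)]
-- ===== Notes on version B (the rewrite author's own statement) =====
-- stated objective: faster
-- what changed: B finds the tile's row and column periods with a KMP failure function (minimal period = length minus longest proper border, computed in one linear pass over the region's row/column sequences) instead of A's scan that re-checks every candidate shift cell by cell, computes the pattern bounds from per-row/per-column flag lists instead of A's min/max fold over all cells, and assembles the output from precomputed full-width phase rows instead of per-cell modular indexing.
import Mathlib
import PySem

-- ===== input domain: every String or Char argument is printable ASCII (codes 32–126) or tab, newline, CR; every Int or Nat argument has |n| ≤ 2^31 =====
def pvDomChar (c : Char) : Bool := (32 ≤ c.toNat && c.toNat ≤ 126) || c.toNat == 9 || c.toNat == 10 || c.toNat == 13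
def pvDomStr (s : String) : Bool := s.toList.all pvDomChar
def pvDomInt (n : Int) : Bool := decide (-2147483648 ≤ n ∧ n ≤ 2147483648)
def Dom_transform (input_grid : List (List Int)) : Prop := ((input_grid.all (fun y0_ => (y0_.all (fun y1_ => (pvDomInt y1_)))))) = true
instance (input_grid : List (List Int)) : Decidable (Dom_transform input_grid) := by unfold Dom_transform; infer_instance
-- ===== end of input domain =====

-- B finds the row/column tile periods with a KMP failure function (linear in the region
-- size) instead of A's cell-by-cell rescan of every candidate shift, computes the pattern
-- bounds from per-row/per-column flag lists, and assembles the output from precomputed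
-- phase rows (objective: faster).

-- ===== PORT A =====
-- background colour: first uniform row, else first uniform column (A's two indexed loops)
def bgA (input_grid : List (List Int)) : Option Int :=
  match (PySem.List.pyRange 0 (PySem.List.len input_grid) 1).find? (fun r =>
      PySem.Set.len (PySem.Set.ofList (PySem.List.pyGetD input_grid r [])) == 1) with
  | some r => some (PySem.List.pyGetD (PySem.List.pyGetD input_grid r []) 0 0)
  | none =>
    match (PySem.List.pyRange 0 (PySem.List.len (PySem.List.pyGetD input_grid 0 [])) 1).find? (fun c =>
        PySem.Set.len (PySem.Set.ofList ((PySem.List.pyRange 0 (PySem.List.len input_grid) 1).map (fun r =>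
          PySem.List.pyGetD (PySem.List.pyGetD input_grid r []) c 0))) == 1) with
    | some c => some (PySem.List.pyGetD (PySem.List.pyGetD input_grid 0 []) c 0)
    | none => none

-- pattern bounds: A's double loop folding (min_r, max_r, min_c, max_c) over every cell
def boundsA (input_grid : List (List Int)) (bg : Option Int) : Int × Int × Int × Int :=
  (PySem.List.pyRange 0 (PySem.List.len input_grid) 1).foldl (fun acc r =>
    (PySem.List.pyRange 0 (PySem.List.len (PySem.List.pyGetD input_grid 0 [])) 1).foldl
      (fun (acc : Int × Int × Int × Int) c =>
        if some (PySem.List.pyGetD (PySem.List.pyGetD input_grid r []) c 0) != bg then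
          (min acc.1 r, max acc.2.1 r, min acc.2.2.1 c, max acc.2.2.2 c)
        else acc) acc)
    (PySem.List.len input_grid, -1, PySem.List.len (PySem.List.pyGetD input_grid 0 []), -1)

-- port of A; the pyGetD defaults and the two `.getD 1` fallbacks stand exactly where Python
-- raises (IndexError / `range(None)` TypeError) — those inputs are excluded by Pre_transform
def transform (input_grid : List (List Int)) : List (List Int) :=
  let H : Int := PySem.List.len input_grid
  let W : Int := PySem.List.len (PySem.List.pyGetD input_grid 0 [])
  let bg : Option Int := bgA input_grid
  let b := boundsA input_grid bg
  let min_r := b.1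
  let max_r := b.2.1
  let min_c := b.2.2.1
  let max_c := b.2.2.2
  let tile_h : Int := ((PySem.List.pyRange 1 (max_r - min_r + 2) 1).find? (fun period =>
      (PySem.List.pyRange min_r (max_r + 1 - period) 1).all (fun r =>
        (PySem.List.pyRange min_c (max_c + 1) 1).all (fun c =>
          PySem.List.pyGetD (PySem.List.pyGetD input_grid r []) c 0 ==
          PySem.List.pyGetD (PySem.List.pyGetD input_grid (r + period) []) c 0)))).getD 1
  let tile_w : Int := ((PySem.List.pyRange 1 (max_c - min_c + 2) 1).find? (fun period =>
      (PySem.List.pyRange min_r (max_r + 1) 1).all (fun r =>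
        (PySem.List.pyRange min_c (max_c + 1 - period) 1).all (fun c =>
          PySem.List.pyGetD (PySem.List.pyGetD input_grid r []) c 0 ==
          PySem.List.pyGetD (PySem.List.pyGetD input_grid r []) (c + period) 0)))).getD 1
  let tile : List (List Int) := (PySem.List.pyRange 0 tile_h 1).map (fun r =>
      (PySem.List.pyRange 0 tile_w 1).map (fun c =>
        PySem.List.pyGetD (PySem.List.pyGetD input_grid (min_r + r) []) (min_c + c) 0))
  let row_shift : Int :=
    PySem.Int.mod (PySem.Int.mod (-min_r) tile_w + PySem.Int.mod (-min_c) tile_h) tile_h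
  (PySem.List.pyRange 0 H 1).map (fun r =>
    (PySem.List.pyRange 0 W 1).map (fun c =>
      PySem.List.pyGetD
        (PySem.List.pyGetD tile (PySem.Int.mod (r + row_shift) tile_h) [])
        (PySem.Int.mod (c + 0) tile_w) 0))

-- ===== PORT B =====
-- the `while k > 0 and seq[i] != seq[k]: k = fail[k-1]` loop of _min_period; the fuel
-- argument is k itself (each pass strictly decreases k, so k passes always suffice)
def kmpAdjust (seq : List (List Int)) (fail : List Int) (i : Int) : Nat → Int → Int
  | 0, k => k
  | fuel + 1, k =>
    if k > 0 && (PySem.List.pyGetD seq i [] != PySem.List.pyGetD seq k []) then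
      kmpAdjust seq fail i fuel (PySem.List.pyGetD fail (k - 1) 0)
    else k

-- _min_period: KMP failure function; minimal period = n - fail[n-1]
def minPeriodOf (seq : List (List Int)) : Int :=
  let n : Int := PySem.List.len seq
  let st := (PySem.List.pyRange 1 n 1).foldl (fun (st : List Int × Int) i =>
      let k1 := kmpAdjust seq st.1 i st.2.toNat st.2
      let k2 := if PySem.List.pyGetD seq i [] == PySem.List.pyGetD seq k1 [] then k1 + 1 else k1
      (st.1 ++ [k2], k2)) ([0], 0)
  n - PySem.List.pyGetD st.1 (n - 1) 0

-- _background: first uniform row's colour, else first uniform column's, else None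
def bgB (input_grid : List (List Int)) : Option Int :=
  match input_grid.find? (fun row => PySem.Set.len (PySem.Set.ofList row) == 1) with
  | some row => some (PySem.List.pyGetD row 0 0)
  | none =>
    match (PySem.List.pyRange 0 (PySem.List.len (PySem.List.pyGetD input_grid 0 [])) 1).find? (fun c =>
        PySem.Set.len (PySem.Set.ofList (input_grid.map (fun row =>
          PySem.List.pyGetD row c 0))) == 1) with
    | some c => some (PySem.List.pyGetD (PySem.List.pyGetD input_grid 0 []) c 0)
    | none => none

def transform_alt (input_grid : List (List Int)) : List (List Int) :=
  let H : Int := PySem.List.len input_grid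
  let W : Int := PySem.List.len (PySem.List.pyGetD input_grid 0 [])
  let bg : Option Int := bgB input_grid
  let rows_with : List Int :=
    ((PySem.List.enumerate input_grid).filter (fun p =>
      (PySem.List.slice p.2 none (some W)).any (fun v => some v != bg))).map (fun p => p.1)
  let min_r := PySem.List.pyGetD rows_with 0 0
  let max_r := PySem.List.pyGetD rows_with (-1) 0
  let cols_with : List Int :=
    (PySem.List.pyRange 0 W 1).filter (fun c =>
      input_grid.any (fun row => some (PySem.List.pyGetD row c 0) != bg))
  let min_c := PySem.List.pyGetD cols_with 0 0
  let max_c := PySem.List.pyGetD cols_with (-1) 0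
  let region : List (List Int) :=
    (PySem.List.slice input_grid (some min_r) (some (max_r + 1))).map (fun row =>
      PySem.List.slice row (some min_c) (some (max_c + 1)))
  let tile_h : Int := minPeriodOf region
  let cols : List (List Int) :=
    (PySem.List.pyRange 0 (PySem.List.len (PySem.List.pyGetD region 0 [])) 1).map (fun c =>
      region.map (fun row => PySem.List.pyGetD row c 0))
  let tile_w : Int := minPeriodOf cols
  let tile : List (List Int) :=
    (PySem.List.slice region none (some tile_h)).map (fun row =>
      PySem.List.slice row none (some tile_w))
  let row_shift : Int :=
    PySem.Int.mod (PySem.Int.mod (-min_r) tile_w + PySem.Int.mod (-min_c) tile_h) tile_h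
  let reps : Int := PySem.Int.floordiv W tile_w + 1
  let phase : List (List Int) :=
    tile.map (fun trow => PySem.List.slice (PySem.List.pyRepeat trow reps) none (some W))
  (PySem.List.pyRange 0 H 1).map (fun r =>
    PySem.List.pyGetD phase (PySem.Int.mod (r + row_shift) tile_h) [])

-- ===== PRECONDITION & SPEC =====
-- pvUniform row ↔ len(set(row)) == 1; pvBg restates A's background choice as a plain
-- first-match lookup so that Pre_ does not mention either port
def pvUniform (row : List Int) : Bool :=
  match row with
  | [] => false
  | v :: t => t.all (fun x => x == v)

def pvBg (g : List (List Int)) : Option Int :=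
  match g.find? pvUniform with
  | some row => some (row.headD 0)
  | none =>
    match (List.range (g.headD []).length).find? (fun c =>
        pvUniform (g.map (fun row => row.getD c 0))) with
    | some c => some ((g.headD []).getD c 0)
    | none => none

-- Pre_ excludes exactly the inputs where A raises: the empty grid / empty first row and
-- rows shorter than the first row (IndexError), and grids whose first-W₀ columns are all
-- background (A's period search then leaves tile_h = None and `range(None)` raises TypeError).
def Pre_transform (input_grid : List (List Int)) : Prop :=
  input_grid ≠ [] ∧
  0 < (input_grid.headD []).length ∧
  (∀ row ∈ input_grid, (input_grid.headD []).length ≤ row.length) ∧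
  (input_grid.any (fun row =>
    (row.take (input_grid.headD []).length).any (fun v => some v != pvBg input_grid))) = true

instance (input_grid : List (List Int)) : Decidable (Pre_transform input_grid) := by
  unfold Pre_transform; infer_instance

def pvWitness_transform : List (List Int) := [[0, 0], [1, 0]]

def Spec_transform (input_grid : List (List Int)) (out : List (List Int)) : Prop :=
  out = transform_alt input_grid
instance (input_grid : List (List Int)) (out : List (List Int)) : Decidable (Spec_transform input_grid out) := by
  unfold Spec_transform; infer_instance

-- ===== CLAIM (what is proved, stated in full; the proofs are below) =====
def Claim_equal_transform : Prop := ∀ (input_grid : List (List Int)), Dom_transform input_grid → Pre_transform input_grid → Spec_transform input_grid (transform input_grid)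

-- ===== LEMMAS AND PROOFS =====

-- proof-side characterizations: row/column flags, pattern bounds, region and columns
def rowFlag (bg : Option Int) (W₀ : Nat) (row : List Int) : Bool :=
  (List.range W₀).any (fun c => some (row.getD c 0) != bg)

def colFlag (g : List (List Int)) (bg : Option Int) (c : Nat) : Bool :=
  g.any (fun row => some (row.getD c 0) != bg)

def Rset (g : List (List Int)) (bg : Option Int) (W₀ : Nat) : List Nat :=
  (List.range g.length).filter (fun r => rowFlag bg W₀ (g.getD r []))

def Cset (g : List (List Int)) (bg : Option Int) (W₀ : Nat) : List Nat :=
  (List.range W₀).filter (colFlag g bg)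

def regionL (g : List (List Int)) (mr xr mc xc : Nat) : List (List Int) :=
  ((g.drop mr).take (xr + 1 - mr)).map (fun row => (row.drop mc).take (xc + 1 - mc))

def colsL (g : List (List Int)) (mr xr mc xc : Nat) : List (List Int) :=
  (List.range (xc + 1 - mc)).map (fun c => (regionL g mr xr mc xc).map (fun row => row.getD c 0))

def cellOf (g : List (List Int)) (r c : Nat) : Int := (g.getD r []).getD c 0

theorem find?_congr_mem {α : Type} {p q : α → Bool} {l : List α} (h : ∀ x ∈ l, p x = q x) :
    l.find? p = l.find? q := by
  induction l with
  | nil => rfl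
  | cons x t ih =>
    simp only [List.find?_cons]
    rw [h x (by simp)]
    cases q x
    · exact ih (fun y hy => h y (by simp [hy]))
    · rfl

theorem getLast_max {l : List Nat} (hs : l.Pairwise (· < ·)) (hne : l ≠ []) :
    ∀ x ∈ l, x ≤ l.getLast hne := by
  induction l with
  | nil => simp
  | cons a t ih =>
    intro x hx
    rcases List.mem_cons.mp hx with rfl | hx
    · cases t with
      | nil => simp
      | cons b u =>
        have h1 : x < b := (List.pairwise_cons.mp hs).1 b (by simp)
        have hb := ih (List.pairwise_cons.mp hs).2 (by simp) b (by simp)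
        rw [List.getLast_cons (by simp)]
        omega
    · cases t with
      | nil => simp at hx
      | cons b u =>
        rw [List.getLast_cons (by simp)]
        exact ih (List.pairwise_cons.mp hs).2 (by simp) x hx

theorem head_min {l : List Nat} (hs : l.Pairwise (· < ·)) (hne : l ≠ []) :
    ∀ x ∈ l, l.head hne ≤ x := by
  cases l with
  | nil => simp at hne
  | cons a t =>
    intro x hx
    rcases List.mem_cons.mp hx with rfl | hx
    · simp
    · exact le_of_lt ((List.pairwise_cons.mp hs).1 x hx)

theorem find?_range_getD {α : Type} (xs : List α) (d : α) (P : α → Bool) :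
    ((List.range xs.length).find? (fun k => P (xs.getD k d))).map (fun k => xs.getD k d)
      = xs.find? P := by
  induction xs with
  | nil => rfl
  | cons x t ih =>
    rw [List.length_cons, List.range_succ_eq_map]
    simp only [List.find?_cons, List.getD_cons_zero]
    cases hP : P x
    · rw [List.find?_map, Option.map_map]
      rw [find?_congr_mem (p := (fun k : Nat => P ((x :: t).getD k d)) ∘ Nat.succ)
            (q := fun k : Nat => P (t.getD k d)) (fun k _ => by simp)]
      cases hf : List.find? (fun k : Nat => P (t.getD k d)) (List.range t.length) with
      | none => rw [hf] at ih; simpa using ih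
      | some k =>
        rw [hf] at ih
        simpa using ih
    · simp

theorem find?_pyRange_getD {α : Type} (xs : List α) (d : α) (P : α → Bool) :
    ((PySem.List.pyRange 0 (xs.length : Int) 1).find? (fun i => P (PySem.List.pyGetD xs i d))).map
        (fun i => PySem.List.pyGetD xs i d) = xs.find? P := by
  rw [PySem.List.pyRange_zero_nat, List.find?_map, Option.map_map]
  rw [find?_congr_mem (p := (fun i : Int => P (PySem.List.pyGetD xs i d)) ∘ fun k : Nat => (k : Int))
        (q := fun k : Nat => P (xs.getD k d)) (fun k _ => by simp)]
  cases hf : List.find? (fun k : Nat => P (xs.getD k d)) (List.range xs.length) with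
  | none => rw [← find?_range_getD xs d P, hf]; rfl
  | some k =>
    rw [← find?_range_getD xs d P, hf]
    simp

theorem uniform_eq (row : List Int) :
    (PySem.Set.len (PySem.Set.ofList row) == 1) = pvUniform row := by
  rw [Bool.eq_iff_iff]
  cases row with
  | nil => simp [pvUniform, PySem.Set.len, PySem.List.len_eq, PySem.Set.ofList]
  | cons v t =>
    rw [PySem.Set.ofList_cons]
    simp only [pvUniform, PySem.Set.len]
    constructor
    · intro h
      have hlen : ((PySem.Set.ofList t).discard v).length = 0 := by
        simp only [PySem.Set.len, PySem.List.len_eq, List.length_cons, beq_iff_eq] at h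
        omega
      have hnil : (PySem.Set.ofList t).discard v = [] := List.eq_nil_of_length_eq_zero hlen
      rw [List.all_eq_true]
      intro x hx
      by_contra hne
      have : x ∈ (PySem.Set.ofList t).discard v := by
        rw [PySem.Set.mem_discard]
        exact ⟨(PySem.Set.mem_ofList t x).mpr hx, by simpa using hne⟩
      rw [hnil] at this
      simp at this
    · intro h
      have hnil : (PySem.Set.ofList t).discard v = [] := by
        rw [List.eq_nil_iff_forall_not_mem]
        intro x hx
        rw [PySem.Set.mem_discard] at hx
        have := (PySem.Set.mem_ofList t x).mp hx.1
        rw [List.all_eq_true] at h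
        exact hx.2 (by simpa using h x this)
      rw [hnil]
      simp [PySem.Set.len, PySem.List.len_eq]

theorem map_pyRange_getD {α β : Type} (xs : List α) (d : α) (f : α → β) :
    (PySem.List.pyRange 0 (xs.length : Int) 1).map (fun i => f (PySem.List.pyGetD xs i d))
      = xs.map f := by
  have h := PySem.List.map_pyGetD_pyRange_zero xs d
  rw [PySem.List.len_eq] at h
  calc (PySem.List.pyRange 0 (xs.length : Int) 1).map (fun i => f (PySem.List.pyGetD xs i d))
      = ((PySem.List.pyRange 0 (xs.length : Int) 1).map (fun i => PySem.List.pyGetD xs i d)).map f := by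
        rw [List.map_map]; rfl
    _ = xs.map f := by rw [h]

theorem bg_eq (g : List (List Int)) :
    (match g.find? (fun row => PySem.Set.len (PySem.Set.ofList row) == 1) with
     | some row => some (PySem.List.pyGetD row 0 0)
     | none =>
       match (PySem.List.pyRange 0 (PySem.List.len (PySem.List.pyGetD g 0 [])) 1).find? (fun c =>
           PySem.Set.len (PySem.Set.ofList (g.map (fun row =>
             PySem.List.pyGetD row c 0))) == 1) with
       | some c => some (PySem.List.pyGetD (PySem.List.pyGetD g 0 []) c 0)
       | none => none)
    = bgA g := by
  unfold bgA
  have h := find?_pyRange_getD g [] (fun row => PySem.Set.len (PySem.Set.ofList row) == 1)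
  simp only [PySem.List.len_eq]
  cases hf : (PySem.List.pyRange 0 (g.length : Int) 1).find? (fun i =>
      PySem.Set.len (PySem.Set.ofList (PySem.List.pyGetD g i [])) == 1) with
  | some r =>
    rw [hf] at h
    simp only [Option.map_some] at h
    rw [← h]
  | none =>
    rw [hf] at h
    simp only [Option.map_none] at h
    rw [← h]
    have hmap : (fun c : Int =>
          PySem.Set.len (PySem.Set.ofList ((PySem.List.pyRange 0 (g.length : Int) 1).map (fun r =>
            PySem.List.pyGetD (PySem.List.pyGetD g r []) c 0))) == 1)
        = (fun c : Int =>
          PySem.Set.len (PySem.Set.ofList (g.map (fun row => PySem.List.pyGetD row c 0))) == 1) := by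
      funext c
      rw [map_pyRange_getD g [] (fun row => PySem.List.pyGetD row c 0)]
    rw [hmap]

theorem headD_getD {α : Type} (l : List α) (d : α) : l.headD d = l.getD 0 d := by
  cases l <;> simp

theorem pvBg_eq (g : List (List Int)) : pvBg g = bgA g := by
  rw [← bg_eq]
  unfold pvBg
  rw [find?_congr_mem (p := pvUniform)
        (q := fun row => PySem.Set.len (PySem.Set.ofList row) == 1)
        (fun row _ => (uniform_eq row).symm)]
  cases hf : g.find? (fun row => PySem.Set.len (PySem.Set.ofList row) == 1) with
  | some row => simp [headD_getD, PySem.List.pyGetD_zero, List.head?_eq_getElem?]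
  | none =>
    simp only
    have hW : (g.headD []).length = (PySem.List.pyGetD g 0 []).length := by
      rw [PySem.List.pyGetD_zero, headD_getD]
    rw [hW, PySem.List.len_eq, PySem.List.pyRange_zero_nat, List.find?_map]
    have hpred : ∀ c : Nat,
        ((fun c : Int => PySem.Set.len (PySem.Set.ofList (g.map (fun row =>
            PySem.List.pyGetD row c 0))) == 1) ∘ (fun k : Nat => (k : Int))) c
        = (fun c : Nat => pvUniform (g.map (fun row => row.getD c 0))) c := by
      intro c
      simp only [Function.comp]
      rw [show (g.map (fun row => PySem.List.pyGetD row (c : Int) 0))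
            = g.map (fun row => row.getD c 0) by
          apply List.map_congr_left; intro row _; simp, uniform_eq]
    rw [find?_congr_mem (fun c _ => hpred c)]
    cases hg : List.find? (fun c : Nat => pvUniform (g.map (fun row => row.getD c 0)))
        (List.range (PySem.List.pyGetD g 0 []).length) with
    | none => simp
    | some c => simp [headD_getD, PySem.List.pyGetD_zero, List.head?_eq_getElem?]

theorem foldl_const_min (l : List Nat) (r a : Int) :
    l.foldl (fun x (_ : Nat) => min x r) a = if l = [] then a else min a r := by
  induction l generalizing a with
  | nil => simp
  | cons x t ih =>
    simp only [List.foldl_cons, ih, min_assoc, min_self]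
    cases t <;> simp [min_assoc, min_self]

theorem foldl_const_max (l : List Nat) (r a : Int) :
    l.foldl (fun x (_ : Nat) => max x r) a = if l = [] then a else max a r := by
  induction l generalizing a with
  | nil => simp
  | cons x t ih =>
    simp only [List.foldl_cons, ih, max_assoc, max_self]
    cases t <;> simp [max_assoc, max_self]

theorem innerB (row : List Int) (bg : Option Int) (W₀ : Nat) (rI : Int)
    (acc : Int × Int × Int × Int) :
    (List.range W₀).foldl (fun acc c =>
        if some (row.getD c 0) != bg then
          (min acc.1 rI, max acc.2.1 rI, min acc.2.2.1 (c : Int), max acc.2.2.2 (c : Int))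
        else acc) acc
    = ((if rowFlag bg W₀ row then min acc.1 rI else acc.1),
       (if rowFlag bg W₀ row then max acc.2.1 rI else acc.2.1),
       ((List.range W₀).filter (fun c => some (row.getD c 0) != bg)).foldl
         (fun x (c : Nat) => min x (c : Int)) acc.2.2.1,
       ((List.range W₀).filter (fun c => some (row.getD c 0) != bg)).foldl
         (fun x (c : Nat) => max x (c : Int)) acc.2.2.2) := by
  obtain ⟨a1, a2, a3, a4⟩ := acc
  have hstep : (fun (acc : Int × Int × Int × Int) (c : Nat) =>
      if some (row.getD c 0) != bg then
        (min acc.1 rI, max acc.2.1 rI, min acc.2.2.1 (c : Int), max acc.2.2.2 (c : Int))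
      else acc)
    = (fun acc c =>
      ((if some (row.getD c 0) != bg then min acc.1 rI else acc.1),
       (if some (row.getD c 0) != bg then max acc.2.1 rI else acc.2.1),
       (if some (row.getD c 0) != bg then min acc.2.2.1 (c : Int) else acc.2.2.1),
       (if some (row.getD c 0) != bg then max acc.2.2.2 (c : Int) else acc.2.2.2))) := by
    funext a c
    by_cases h : (some (row.getD c 0) != bg) = true
    · rw [if_pos h, if_pos h, if_pos h, if_pos h, if_pos h]
    · rw [if_neg h, if_neg h, if_neg h, if_neg h, if_neg h]
  rw [hstep]
  rw [PySem.List.foldl_prod_mk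
        (f := fun a (c : Nat) => if some (row.getD c 0) != bg then min a rI else a)
        (g := fun (s : Int × Int × Int) (c : Nat) =>
          ((if some (row.getD c 0) != bg then max s.1 rI else s.1),
           (if some (row.getD c 0) != bg then min s.2.1 (c : Int) else s.2.1),
           (if some (row.getD c 0) != bg then max s.2.2 (c : Int) else s.2.2)))]
  rw [PySem.List.foldl_prod_mk
        (f := fun a (c : Nat) => if some (row.getD c 0) != bg then max a rI else a)
        (g := fun (s : Int × Int) (c : Nat) =>
          ((if some (row.getD c 0) != bg then min s.1 (c : Int) else s.1),
           (if some (row.getD c 0) != bg then max s.2 (c : Int) else s.2)))]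
  rw [PySem.List.foldl_prod_mk
        (f := fun a (c : Nat) => if some (row.getD c 0) != bg then min a (c : Int) else a)
        (g := fun (a : Int) (c : Nat) => if some (row.getD c 0) != bg then max a (c : Int) else a)]
  have hempty : ((List.range W₀).filter (fun c => some (row.getD c 0) != bg) = [])
      ↔ rowFlag bg W₀ row = false := by
    simp [rowFlag, List.filter_eq_nil_iff, List.any_eq_false]
  refine congrArg₂ Prod.mk ?_ (congrArg₂ Prod.mk ?_ (congrArg₂ Prod.mk ?_ ?_))
  · rw [PySem.List.foldl_if_eq_foldl_filter, foldl_const_min]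
    cases h : rowFlag bg W₀ row
    · rw [if_pos (hempty.mpr h)]; simp
    · rw [if_neg]; · simp
      intro hnil; rw [hempty.mp hnil] at h; simp at h
  · rw [PySem.List.foldl_if_eq_foldl_filter, foldl_const_max]
    cases h : rowFlag bg W₀ row
    · rw [if_pos (hempty.mpr h)]; simp
    · rw [if_neg]; · simp
      intro hnil; rw [hempty.mp hnil] at h; simp at h
  · exact PySem.List.foldl_if_eq_foldl_filter _ _ _ _
  · exact PySem.List.foldl_if_eq_foldl_filter _ _ _ _

theorem fold_min_first (n : Nat) (F : Nat → Bool) (hne : (List.range n).filter F ≠ []) :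
    (List.range n).foldl (fun a k => if F k then min a (k : Int) else a) (n : Int)
      = (((List.range n).filter F).head hne : Int) := by
  rw [PySem.List.foldl_if_eq_foldl_filter]
  set S := (List.range n).filter F with hS
  have hsort : S.Pairwise (· < ·) := List.Pairwise.filter _ List.pairwise_lt_range
  have hconv : (S.map (fun k : Nat => (k : Int))).foldl min (n : Int)
      = S.foldl (fun a (k : Nat) => min a (k : Int)) (n : Int) := List.foldl_map
  rw [← hconv]
  have hh : S.head hne ∈ S := List.head_mem hne
  have h1 := PySem.List.foldl_min_le (S.map (fun k : Nat => (k : Int))) (n : Int)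
  have h2 := PySem.List.foldl_min_mem (S.map (fun k : Nat => (k : Int))) (n : Int)
  have hheadlt : S.head hne < n := by
    have hh' : S.head hne ∈ List.filter F (List.range n) := by rw [← hS]; exact hh
    exact List.mem_range.mp (List.mem_filter.mp hh').1
  apply le_antisymm
  · exact h1.2 _ (List.mem_map_of_mem hh)
  · rcases h2 with h | h
    · rw [h]
      exact le_of_lt (by exact_mod_cast hheadlt)
    · rcases List.mem_map.mp h with ⟨k, hk, hke⟩
      rw [← hke]
      exact_mod_cast head_min hsort hne k hk

theorem fold_max_last (n : Nat) (F : Nat → Bool) (hne : (List.range n).filter F ≠ []) :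
    (List.range n).foldl (fun a k => if F k then max a (k : Int) else a) (-1 : Int)
      = (((List.range n).filter F).getLast hne : Int) := by
  rw [PySem.List.foldl_if_eq_foldl_filter]
  set S := (List.range n).filter F with hS
  have hsort : S.Pairwise (· < ·) := List.Pairwise.filter _ List.pairwise_lt_range
  have hconv : (S.map (fun k : Nat => (k : Int))).foldl max (-1 : Int)
      = S.foldl (fun a (k : Nat) => max a (k : Int)) (-1 : Int) := List.foldl_map
  rw [← hconv]
  have hh : S.getLast hne ∈ S := List.getLast_mem hne
  have h1 := PySem.List.le_foldl_max (S.map (fun k : Nat => (k : Int))) (-1 : Int)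
  have h2 := PySem.List.foldl_max_mem (S.map (fun k : Nat => (k : Int))) (-1 : Int)
  apply le_antisymm
  · rcases h2 with h | h
    · rw [h]
      have : (0 : Int) ≤ (S.getLast hne : Int) := by positivity
      omega
    · rcases List.mem_map.mp h with ⟨k, hk, hke⟩
      rw [← hke]
      exact_mod_cast getLast_max hsort hne k hk
  · exact h1.2 _ (List.mem_map_of_mem hh)

theorem mem_T_mem_Cset (g : List (List Int)) (bg : Option Int) (W₀ : Nat) :
    ∀ k ∈ (List.range g.length).flatMap (fun r =>
        (List.range W₀).filter (fun c => some ((g.getD r []).getD c 0) != bg)),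
      k ∈ Cset g bg W₀ := by
  intro k hk
  rcases List.mem_flatMap.mp hk with ⟨r, hr, hkf⟩
  rcases List.mem_filter.mp hkf with ⟨hkr, hflag⟩
  refine List.mem_filter.mpr ⟨hkr, ?_⟩
  apply List.any_eq_true.mpr
  refine ⟨g.getD r [], ?_, hflag⟩
  have hrlt := List.mem_range.mp hr
  rw [List.getD_eq_getElem g [] hrlt]
  exact List.getElem_mem hrlt

theorem head_Cset_mem_T (g : List (List Int)) (bg : Option Int) (W₀ : Nat)
    (hC : Cset g bg W₀ ≠ []) :
    (Cset g bg W₀).head hC ∈ (List.range g.length).flatMap (fun r =>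
        (List.range W₀).filter (fun c => some ((g.getD r []).getD c 0) != bg)) := by
  have hh := List.head_mem hC
  rcases List.mem_filter.mp hh with ⟨hkr, hflag⟩
  rcases List.any_eq_true.mp hflag with ⟨row, hrow, hp⟩
  rcases List.mem_iff_getElem.mp hrow with ⟨r, hrlt, hre⟩
  refine List.mem_flatMap.mpr ⟨r, List.mem_range.mpr hrlt, ?_⟩
  refine List.mem_filter.mpr ⟨hkr, ?_⟩
  rw [List.getD_eq_getElem g [] hrlt, hre]
  exact hp

theorem getLast_Cset_mem_T (g : List (List Int)) (bg : Option Int) (W₀ : Nat)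
    (hC : Cset g bg W₀ ≠ []) :
    (Cset g bg W₀).getLast hC ∈ (List.range g.length).flatMap (fun r =>
        (List.range W₀).filter (fun c => some ((g.getD r []).getD c 0) != bg)) := by
  have hh := List.getLast_mem hC
  rcases List.mem_filter.mp hh with ⟨hkr, hflag⟩
  rcases List.any_eq_true.mp hflag with ⟨row, hrow, hp⟩
  rcases List.mem_iff_getElem.mp hrow with ⟨r, hrlt, hre⟩
  refine List.mem_flatMap.mpr ⟨r, List.mem_range.mpr hrlt, ?_⟩
  refine List.mem_filter.mpr ⟨hkr, ?_⟩
  rw [List.getD_eq_getElem g [] hrlt, hre]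
  exact hp

theorem fold_min_T (g : List (List Int)) (bg : Option Int) (W₀ : Nat)
    (hC : Cset g bg W₀ ≠ []) :
    ((List.range g.length).flatMap (fun r =>
        (List.range W₀).filter (fun c => some ((g.getD r []).getD c 0) != bg))).foldl
      (fun a (k : Nat) => min a (k : Int)) (W₀ : Int)
    = ((Cset g bg W₀).head hC : Int) := by
  set T := (List.range g.length).flatMap (fun r =>
      (List.range W₀).filter (fun c => some ((g.getD r []).getD c 0) != bg)) with hT
  have hconv : (T.map (fun k : Nat => (k : Int))).foldl min (W₀ : Int)
      = T.foldl (fun a (k : Nat) => min a (k : Int)) (W₀ : Int) := List.foldl_map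
  rw [← hconv]
  have hcs : (Cset g bg W₀).Pairwise (· < ·) := List.Pairwise.filter _ List.pairwise_lt_range
  have h1 := PySem.List.foldl_min_le (T.map (fun k : Nat => (k : Int))) (W₀ : Int)
  have h2 := PySem.List.foldl_min_mem (T.map (fun k : Nat => (k : Int))) (W₀ : Int)
  have hheadlt : (Cset g bg W₀).head hC < W₀ :=
    List.mem_range.mp (List.mem_filter.mp (List.head_mem hC)).1
  apply le_antisymm
  · exact h1.2 _ (List.mem_map_of_mem (head_Cset_mem_T g bg W₀ hC))
  · rcases h2 with h | h
    · rw [h]; exact le_of_lt (by exact_mod_cast hheadlt)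
    · rcases List.mem_map.mp h with ⟨k, hk, hke⟩
      rw [← hke]
      exact_mod_cast head_min hcs hC k (mem_T_mem_Cset g bg W₀ k hk)

theorem fold_max_T (g : List (List Int)) (bg : Option Int) (W₀ : Nat)
    (hC : Cset g bg W₀ ≠ []) :
    ((List.range g.length).flatMap (fun r =>
        (List.range W₀).filter (fun c => some ((g.getD r []).getD c 0) != bg))).foldl
      (fun a (k : Nat) => max a (k : Int)) (-1 : Int)
    = ((Cset g bg W₀).getLast hC : Int) := by
  set T := (List.range g.length).flatMap (fun r =>
      (List.range W₀).filter (fun c => some ((g.getD r []).getD c 0) != bg)) with hT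
  have hconv : (T.map (fun k : Nat => (k : Int))).foldl max (-1 : Int)
      = T.foldl (fun a (k : Nat) => max a (k : Int)) (-1 : Int) := List.foldl_map
  rw [← hconv]
  have hcs : (Cset g bg W₀).Pairwise (· < ·) := List.Pairwise.filter _ List.pairwise_lt_range
  have h1 := PySem.List.le_foldl_max (T.map (fun k : Nat => (k : Int))) (-1 : Int)
  have h2 := PySem.List.foldl_max_mem (T.map (fun k : Nat => (k : Int))) (-1 : Int)
  apply le_antisymm
  · rcases h2 with h | h
    · rw [h]
      have : (0 : Int) ≤ ((Cset g bg W₀).getLast hC : Int) := by positivity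
      omega
    · rcases List.mem_map.mp h with ⟨k, hk, hke⟩
      rw [← hke]
      exact_mod_cast getLast_max hcs hC k (mem_T_mem_Cset g bg W₀ k hk)
  · exact h1.2 _ (List.mem_map_of_mem (getLast_Cset_mem_T g bg W₀ hC))

theorem boundsA_eq (g : List (List Int)) (bg : Option Int)
    (hR : Rset g bg (g.getD 0 []).length ≠ []) (hC : Cset g bg (g.getD 0 []).length ≠ []) :
    boundsA g bg = (((Rset g bg (g.getD 0 []).length).head hR : Int),
                    ((Rset g bg (g.getD 0 []).length).getLast hR : Int),
                    ((Cset g bg (g.getD 0 []).length).head hC : Int),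
                    ((Cset g bg (g.getD 0 []).length).getLast hC : Int)) := by
  set W₀ := (g.getD 0 []).length with hW
  unfold boundsA
  simp only [PySem.List.len_eq, PySem.List.pyGetD_zero, PySem.List.pyRange_zero_nat,
    List.foldl_map, PySem.List.pyGetD_natCast, ← hW]
  have hbody : (fun (acc : Int × Int × Int × Int) (r : Nat) =>
      (List.range W₀).foldl (fun acc (c : Nat) =>
        if some ((g.getD r []).getD c 0) != bg then
          (min acc.1 (r : Int), max acc.2.1 (r : Int), min acc.2.2.1 (c : Int), max acc.2.2.2 (c : Int))
        else acc) acc)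
    = (fun acc r =>
      ((if rowFlag bg W₀ (g.getD r []) then min acc.1 (r : Int) else acc.1),
       (if rowFlag bg W₀ (g.getD r []) then max acc.2.1 (r : Int) else acc.2.1),
       ((List.range W₀).filter (fun c => some ((g.getD r []).getD c 0) != bg)).foldl
         (fun x (c : Nat) => min x (c : Int)) acc.2.2.1,
       ((List.range W₀).filter (fun c => some ((g.getD r []).getD c 0) != bg)).foldl
         (fun x (c : Nat) => max x (c : Int)) acc.2.2.2)) := by
    funext a r
    exact innerB (g.getD r []) bg W₀ (r : Int) a
  rw [hbody]
  rw [PySem.List.foldl_prod_mk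
        (f := fun a (r : Nat) => if rowFlag bg W₀ (g.getD r []) then min a (r : Int) else a)
        (g := fun (s : Int × Int × Int) (r : Nat) =>
          ((if rowFlag bg W₀ (g.getD r []) then max s.1 (r : Int) else s.1),
           ((List.range W₀).filter (fun c => some ((g.getD r []).getD c 0) != bg)).foldl
             (fun x (c : Nat) => min x (c : Int)) s.2.1,
           ((List.range W₀).filter (fun c => some ((g.getD r []).getD c 0) != bg)).foldl
             (fun x (c : Nat) => max x (c : Int)) s.2.2))]
  rw [PySem.List.foldl_prod_mk
        (f := fun a (r : Nat) => if rowFlag bg W₀ (g.getD r []) then max a (r : Int) else a)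
        (g := fun (s : Int × Int) (r : Nat) =>
          (((List.range W₀).filter (fun c => some ((g.getD r []).getD c 0) != bg)).foldl
             (fun x (c : Nat) => min x (c : Int)) s.1,
           ((List.range W₀).filter (fun c => some ((g.getD r []).getD c 0) != bg)).foldl
             (fun x (c : Nat) => max x (c : Int)) s.2))]
  rw [PySem.List.foldl_prod_mk
        (f := fun a (r : Nat) =>
          ((List.range W₀).filter (fun c => some ((g.getD r []).getD c 0) != bg)).foldl
             (fun x (c : Nat) => min x (c : Int)) a)
        (g := fun a (r : Nat) =>
          ((List.range W₀).filter (fun c => some ((g.getD r []).getD c 0) != bg)).foldl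
             (fun x (c : Nat) => max x (c : Int)) a)]
  refine congrArg₂ Prod.mk ?_ (congrArg₂ Prod.mk ?_ (congrArg₂ Prod.mk ?_ ?_))
  · exact fold_min_first g.length _ hR
  · exact fold_max_last g.length _ hR
  · rw [← List.foldl_flatMap]
    exact fold_min_T g bg W₀ hC
  · rw [← List.foldl_flatMap]
    exact fold_max_T g bg W₀ hC

theorem regionL_length (g : List (List Int)) (mr xr mc xc : Nat) (hxr : xr < g.length) :
    (regionL g mr xr mc xc).length = xr + 1 - mr := by
  unfold regionL
  rw [List.length_map, List.length_take, List.length_drop]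
  omega

theorem regionL_getElem (g : List (List Int)) (mr xr mc xc : Nat) (i : Nat)
    (hxr : xr < g.length) (hi : i < xr + 1 - mr) :
    (regionL g mr xr mc xc)[i]'(by rw [regionL_length g mr xr mc xc hxr]; exact hi)
      = (((g[mr + i]'(by omega)).drop mc).take (xc + 1 - mc)) := by
  unfold regionL
  rw [List.getElem_map, List.getElem_take, List.getElem_drop]

theorem rowslice_eq_iff (row row' : List Int) (mc xc : Nat) (hmc : mc ≤ xc)
    (h1 : xc < row.length) (h2 : xc < row'.length) :
    ((row.drop mc).take (xc + 1 - mc) = (row'.drop mc).take (xc + 1 - mc))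
      ↔ ∀ c < xc + 1 - mc, row.getD (mc + c) 0 = row'.getD (mc + c) 0 := by
  constructor
  · intro h c hc
    have hlen : c < ((row.drop mc).take (xc + 1 - mc)).length := by
      rw [List.length_take, List.length_drop]; omega
    have := (List.ext_getElem_iff.mp h).2 c hlen (by
      rw [List.length_take, List.length_drop]; omega)
    rw [List.getElem_take, List.getElem_drop] at this
    rw [List.getElem_take, List.getElem_drop] at this
    rw [List.getD_eq_getElem row 0 (by omega), List.getD_eq_getElem row' 0 (by omega)]
    exact this
  · intro h
    apply List.ext_getElem
    · rw [List.length_take, List.length_drop, List.length_take, List.length_drop]; omega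
    · intro c hc1 hc2
      rw [List.length_take, List.length_drop] at hc1
      have hc : c < xc + 1 - mc := by omega
      have := h c hc
      rw [List.getD_eq_getElem row 0 (by omega), List.getD_eq_getElem row' 0 (by omega)] at this
      rw [List.getElem_take, List.getElem_drop, List.getElem_take, List.getElem_drop]
      exact this

theorem take_any_eq (row : List Int) (m : Nat) (hm : m ≤ row.length) (f : Int → Bool) :
    (row.take m).any f = (List.range m).any (fun c => f (row.getD c 0)) := by
  rw [Bool.eq_iff_iff, List.any_eq_true, List.any_eq_true]
  constructor
  · rintro ⟨x, hx, hfx⟩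
    rcases List.mem_take_iff_getElem.mp hx with ⟨i, hi, hie⟩
    refine ⟨i, List.mem_range.mpr (by omega), ?_⟩
    rw [List.getD_eq_getElem row 0 (by omega)]
    rw [← hie] at hfx
    convert hfx using 2
  · rintro ⟨c, hc, hfc⟩
    have hcm := List.mem_range.mp hc
    refine ⟨row[c]'(by omega), ?_, ?_⟩
    · exact List.mem_take_iff_getElem.mpr ⟨c, by omega, rfl⟩
    · rw [List.getD_eq_getElem row 0 (by omega)] at hfc
      exact hfc

theorem length_flatten_replicate {α : Type} (xs : List α) (k : Nat) :
    (List.replicate k xs).flatten.length = k * xs.length := by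
  rw [List.length_flatten]
  simp [List.map_replicate]

theorem getElem_flatten_replicate {α : Type} (xs : List α) (k i : Nat)
    (hx : xs ≠ []) (hi : i < k * xs.length) :
    ((List.replicate k xs).flatten)[i]'(by
        rw [length_flatten_replicate]; exact hi)
      = xs[i % xs.length]'(Nat.mod_lt i (List.length_pos_of_ne_nil hx)) := by
  induction k generalizing i with
  | zero => omega
  | succ m ih =>
    have hflat : (List.replicate (m + 1) xs).flatten = xs ++ (List.replicate m xs).flatten := by
      rw [List.replicate_succ, List.flatten_cons]
    by_cases hlt : i < xs.length
    · have hmod : i % xs.length = i := Nat.mod_eq_of_lt hlt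
      simp only [hflat]
      rw [List.getElem_append_left hlt]
      congr 1
      omega
    · have hlen : xs.length ≤ i := le_of_not_gt hlt
      have h2 : (m + 1) * xs.length = m * xs.length + xs.length := Nat.succ_mul m xs.length
      have hi' : i - xs.length < m * xs.length := by omega
      have hidx : i % xs.length = (i - xs.length) % xs.length := Nat.mod_eq_sub_mod hlen
      simp only [hflat]
      rw [List.getElem_append_right hlen]
      rw [ih (i - xs.length) hi']
      simp only [hidx]

theorem matchA_row_iff (g : List (List Int)) (mr xr mc xc q : Nat)
    (hq1 : 1 ≤ q) (hqn : q ≤ xr + 1 - mr) (hmr : mr ≤ xr) (hmc : mc ≤ xc) :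
    (((PySem.List.pyRange (mr : Int) ((xr : Int) + 1 - (q : Int)) 1).all (fun r =>
       (PySem.List.pyRange (mc : Int) ((xc : Int) + 1) 1).all (fun c =>
         PySem.List.pyGetD (PySem.List.pyGetD g r []) c 0 ==
         PySem.List.pyGetD (PySem.List.pyGetD g (r + (q : Int)) []) c 0))) = true)
    ↔ ∀ i < xr + 1 - mr - q, ∀ c < xc + 1 - mc,
        cellOf g (mr + i) (mc + c) = cellOf g (mr + i + q) (mc + c) := by
  rw [PySem.List.pyRange_one (mr : Int) ((xr : Int) + 1 - (q : Int)),
      PySem.List.pyRange_one (mc : Int) ((xc : Int) + 1)]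
  rw [show (((xr : Int) + 1 - (q : Int)) - (mr : Int)).toNat = xr + 1 - mr - q by omega,
      show (((xc : Int) + 1) - (mc : Int)).toNat = xc + 1 - mc by omega]
  simp only [List.all_map, List.all_eq_true, List.mem_range, Function.comp,
    ← Nat.cast_add, PySem.List.pyGetD_natCast, beq_iff_eq]
  unfold cellOf
  constructor
  · intro h i hi c hc
    have := h i hi c hc
    rw [List.getD_eq_getElem?_getD, List.getD_eq_getElem?_getD,
        List.getD_eq_getElem?_getD, List.getD_eq_getElem?_getD]
    exact this
  · intro h i hi c hc
    have := h i hi c hc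
    rw [List.getD_eq_getElem?_getD, List.getD_eq_getElem?_getD,
        List.getD_eq_getElem?_getD, List.getD_eq_getElem?_getD] at this
    exact this

theorem colsL_length (g : List (List Int)) (mr xr mc xc : Nat) :
    (colsL g mr xr mc xc).length = xc + 1 - mc := by
  unfold colsL
  rw [List.length_map, List.length_range]

theorem colsL_getElem (g : List (List Int)) (mr xr mc xc j : Nat) (hj : j < xc + 1 - mc) :
    (colsL g mr xr mc xc)[j]'(by rw [colsL_length]; exact hj)
      = (regionL g mr xr mc xc).map (fun row => row.getD j 0) := by
  unfold colsL
  rw [List.getElem_map, List.getElem_range]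

theorem regionRow_getD (row : List Int) (mc xc j : Nat) (hmc : mc ≤ xc)
    (hxc : xc < row.length) (hj : j < xc + 1 - mc) :
    ((row.drop mc).take (xc + 1 - mc)).getD j 0 = row.getD (mc + j) 0 := by
  rw [List.getD_eq_getElem _ 0 (by rw [List.length_take, List.length_drop]; omega),
      List.getD_eq_getElem row 0 (by omega)]
  rw [List.getElem_take, List.getElem_drop]

theorem colsL_eq_iff (g : List (List Int)) (mr xr mc xc i j : Nat)
    (hi : i < xc + 1 - mc) (hj : j < xc + 1 - mc) (hmr : mr ≤ xr) (hmc : mc ≤ xc)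
    (hxr : xr < g.length) (hxc : ∀ row ∈ g, xc < row.length) :
    ((colsL g mr xr mc xc)[i]'(by rw [colsL_length]; exact hi)
      = (colsL g mr xr mc xc)[j]'(by rw [colsL_length]; exact hj))
    ↔ ∀ r < xr + 1 - mr, cellOf g (mr + r) (mc + i) = cellOf g (mr + r) (mc + j) := by
  rw [colsL_getElem g mr xr mc xc i hi, colsL_getElem g mr xr mc xc j hj]
  rw [List.map_inj_left]
  have hRlen : (regionL g mr xr mc xc).length = xr + 1 - mr := regionL_length g mr xr mc xc hxr
  constructor
  · intro h r hr
    have hmem : (regionL g mr xr mc xc)[r]'(by omega) ∈ regionL g mr xr mc xc :=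
      List.getElem_mem (by omega)
    have h1 := h _ hmem
    rw [regionL_getElem g mr xr mc xc r hxr hr] at h1
    have hrow : xc < (g[mr + r]'(by omega)).length := hxc _ (List.getElem_mem (by omega))
    rw [regionRow_getD _ mc xc i hmc hrow hi, regionRow_getD _ mc xc j hmc hrow hj] at h1
    unfold cellOf
    rw [List.getD_eq_getElem g [] (show mr + r < g.length by omega)]
    exact h1
  · intro h row hrow
    rcases List.mem_iff_getElem.mp hrow with ⟨r, hr, hre⟩
    have hr' : r < xr + 1 - mr := by omega
    have h1 := h r hr'
    unfold cellOf at h1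
    rw [List.getD_eq_getElem g [] (show mr + r < g.length by omega)] at h1
    have hrowl : xc < (g[mr + r]'(by omega)).length := hxc _ (List.getElem_mem (by omega))
    rw [← hre]
    rw [regionL_getElem g mr xr mc xc r hxr hr']
    rw [regionRow_getD _ mc xc i hmc hrowl hi, regionRow_getD _ mc xc j hmc hrowl hj]
    exact h1

theorem matchA_col_iff (g : List (List Int)) (mr xr mc xc q : Nat)
    (hq1 : 1 ≤ q) (hqn : q ≤ xc + 1 - mc) (hmr : mr ≤ xr) (hmc : mc ≤ xc) :
    (((PySem.List.pyRange (mr : Int) ((xr : Int) + 1) 1).all (fun r =>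
       (PySem.List.pyRange (mc : Int) ((xc : Int) + 1 - (q : Int)) 1).all (fun c =>
         PySem.List.pyGetD (PySem.List.pyGetD g r []) c 0 ==
         PySem.List.pyGetD (PySem.List.pyGetD g r []) (c + (q : Int)) 0))) = true)
    ↔ ∀ r < xr + 1 - mr, ∀ j < xc + 1 - mc - q,
        cellOf g (mr + r) (mc + j) = cellOf g (mr + r) (mc + j + q) := by
  rw [PySem.List.pyRange_one (mr : Int) ((xr : Int) + 1),
      PySem.List.pyRange_one (mc : Int) ((xc : Int) + 1 - (q : Int))]
  rw [show (((xr : Int) + 1) - (mr : Int)).toNat = xr + 1 - mr by omega,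
      show (((xc : Int) + 1 - (q : Int)) - (mc : Int)).toNat = xc + 1 - mc - q by omega]
  simp only [List.all_map, List.all_eq_true, List.mem_range, Function.comp,
    ← Nat.cast_add, PySem.List.pyGetD_natCast, beq_iff_eq]
  unfold cellOf
  constructor
  · intro h r hr j hj
    have := h r hr j hj
    rw [List.getD_eq_getElem?_getD, List.getD_eq_getElem?_getD]
    exact this
  · intro h r hr j hj
    have := h r hr j hj
    rw [List.getD_eq_getElem?_getD, List.getD_eq_getElem?_getD] at this
    exact this

theorem tileA_eq (g : List (List Int)) (mr xr mc xc th tw : Nat)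
    (hmr : mr ≤ xr) (hmc : mc ≤ xc) (hxr : xr < g.length)
    (hxc : ∀ row ∈ g, xc < row.length)
    (hthn : th ≤ xr + 1 - mr) (htww : tw ≤ xc + 1 - mc) :
    (PySem.List.pyRange 0 (th : Int) 1).map (fun r =>
        (PySem.List.pyRange 0 (tw : Int) 1).map (fun c =>
          PySem.List.pyGetD (PySem.List.pyGetD g ((mr : Int) + r) []) ((mc : Int) + c) 0))
      = (PySem.List.slice (regionL g mr xr mc xc) none (some (th : Int))).map (fun row =>
          PySem.List.slice row none (some (tw : Int))) := by
  rw [PySem.List.slice_to_natCast]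
  have hmapslice : (List.take th (regionL g mr xr mc xc)).map (fun row =>
        PySem.List.slice row none (some (tw : Int)))
      = (List.take th (regionL g mr xr mc xc)).map (fun row => row.take tw) := by
    apply List.map_congr_left
    intro row _
    rw [PySem.List.slice_to_natCast]
  rw [hmapslice]
  rw [PySem.List.pyRange_zero_nat th, List.map_map]
  apply List.ext_getElem
  · simp only [List.length_map, List.length_range, List.length_take]
    rw [regionL_length g mr xr mc xc hxr]
    omega
  · intro r hr1 hr2
    simp only [List.length_map, List.length_range] at hr1
    simp only [List.getElem_map, List.getElem_range, Function.comp]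
    rw [List.getElem_take]
    rw [regionL_getElem g mr xr mc xc r hxr (by omega)]
    rw [PySem.List.pyRange_zero_nat tw, List.map_map]
    have hrowl : xc < (g[mr + r]'(by omega)).length := hxc _ (List.getElem_mem (by omega))
    apply List.ext_getElem
    · simp only [List.length_map, List.length_range, List.length_take, List.length_drop]
      omega
    · intro c hc1 hc2
      simp only [List.length_map, List.length_range] at hc1
      simp only [List.getElem_map, List.getElem_range, Function.comp]
      rw [List.getElem_take, List.getElem_take, List.getElem_drop]
      simp only [← Nat.cast_add, PySem.List.pyGetD_natCast]
      rw [List.getD_eq_getElem?_getD, List.getD_eq_getElem?_getD] at *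
      rw [← List.getD_eq_getElem?_getD, ← List.getD_eq_getElem?_getD]
      rw [List.getD_eq_getElem g [] (show mr + r < g.length by omega)]
      rw [List.getD_eq_getElem _ 0 (show mc + c < (g[mr + r]'(by omega)).length by omega)]

theorem out_row_eq (trow : List Int) (W₀ tw : Nat) (htw : trow.length = tw) (htw1 : 1 ≤ tw) :
    (PySem.List.pyRange 0 (W₀ : Int) 1).map (fun c =>
        PySem.List.pyGetD trow (PySem.Int.mod (c + 0) (tw : Int)) 0)
      = PySem.List.slice (PySem.List.pyRepeat trow
          (PySem.Int.floordiv (W₀ : Int) (tw : Int) + 1)) none (some (W₀ : Int)) := by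
  subst htw
  have hne : trow ≠ [] := by
    intro h; rw [h] at htw1; simp at htw1
  have hfd : PySem.Int.floordiv (W₀ : Int) (trow.length : Int) + 1
      = ((W₀ / trow.length + 1 : Nat) : Int) := by
    rw [PySem.Int.floordiv_natCast]
    push_cast
    ring
  set k := W₀ / trow.length + 1 with hk
  have hWk : W₀ < k * trow.length := by
    have h1 := Nat.div_add_mod W₀ trow.length
    have h2 := Nat.mod_lt W₀ (show 0 < trow.length by omega)
    have h3 : k * trow.length = W₀ / trow.length * trow.length + trow.length := by
      rw [hk]; ring
    have h4 : W₀ / trow.length * trow.length = trow.length * (W₀ / trow.length) :=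
      Nat.mul_comm _ _
    omega
  rw [hfd]
  unfold PySem.List.pyRepeat
  rw [Int.toNat_natCast, PySem.List.slice_to_natCast]
  rw [PySem.List.pyRange_zero_nat W₀, List.map_map]
  apply List.ext_getElem
  · rw [List.length_map, List.length_range, List.length_take, length_flatten_replicate]
    omega
  · intro j hj1 hj2
    rw [List.length_map, List.length_range] at hj1
    rw [List.getElem_map, List.getElem_range, List.getElem_take]
    rw [getElem_flatten_replicate trow k j hne (by omega)]
    simp only [Function.comp]
    rw [add_zero, PySem.Int.mod_natCast]
    rw [PySem.List.pyGetD_natCast]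
    rw [List.getD_eq_getElem trow 0 (Nat.mod_lt j (by omega))]

theorem enum_filter_map {α : Type} (d : α) (q : α → Bool) (xs : List α) : ∀ s : Nat,
    ((PySem.List.enumerate xs (s : Int)).filter (fun p => q p.2)).map (fun p => p.1)
      = ((List.range xs.length).filter (fun i => q (xs.getD i d))).map
          (fun k => ((s + k : Nat) : Int)) := by
  induction xs with
  | nil => intro s; rfl
  | cons x t ih =>
    intro s
    rw [PySem.List.enumerate_cons, List.length_cons, List.range_succ_eq_map]
    rw [List.filter_cons, List.filter_cons]
    have hs1 : ((s : Int) + 1) = ((s + 1 : Nat) : Int) := by push_cast; ring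
    rw [hs1]
    simp only [List.getD_cons_zero]
    rw [List.filter_map]
    have hcomp : ((fun i => q ((x :: t).getD i d)) ∘ Nat.succ) = fun i => q (t.getD i d) := by
      funext i
      simp
    rw [hcomp]
    cases hq : q x
    · simp only [Bool.false_eq_true, reduceIte]
      rw [ih (s + 1), List.map_map]
      apply List.map_congr_left
      intro k _
      simp only [Function.comp]
      congr 1
      omega
    · simp only [reduceIte]
      rw [List.map_cons, List.map_cons, ih (s + 1), List.map_map]
      congr 1
      apply List.map_congr_left
      intro k _
      simp only [Function.comp]
      congr 1
      omega

theorem map_cast_getD_zero (l : List Nat) (hl : l ≠ []) :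
    (l.map (fun k : Nat => (k : Int))).getD 0 0 = ((l.head hl : Nat) : Int) := by
  cases l with
  | nil => simp at hl
  | cons a t => simp

theorem map_cast_pyGetD_neg_one (l : List Nat) (hl : l ≠ []) :
    PySem.List.pyGetD (l.map (fun k : Nat => (k : Int))) (-1) 0 = ((l.getLast hl : Nat) : Int) := by
  have hml : l.map (fun k : Nat => (k : Int)) ≠ [] := by
    simpa using hl
  rw [PySem.List.pyGetD_neg_one _ 0 hml]
  rw [List.getLast_map]

theorem bgB_eq (g : List (List Int)) : bgB g = bgA g := by
  unfold bgB
  exact bg_eq g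

theorem rows_with_eq (g : List (List Int)) (bg : Option Int) (W₀ : Nat)
    (hlen : ∀ row ∈ g, W₀ ≤ row.length) :
    ((PySem.List.enumerate g 0).filter (fun p =>
        (PySem.List.slice p.2 none (some (W₀ : Int))).any (fun v => some v != bg))).map
          (fun p => p.1)
      = (Rset g bg W₀).map (fun k : Nat => (k : Int)) := by
  rw [show (0 : Int) = ((0 : Nat) : Int) by norm_num]
  rw [enum_filter_map ([] : List Int) (fun row =>
      (PySem.List.slice row none (some (W₀ : Int))).any (fun v => some v != bg)) g 0]
  unfold Rset
  rw [List.filter_congr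
    (q := fun i => rowFlag bg W₀ (g.getD i []))
    (fun i hi => by
      rw [PySem.List.slice_to_natCast]
      have hilt : i < g.length := List.mem_range.mp hi
      have hmem : g.getD i [] ∈ g := by
        rw [List.getD_eq_getElem g [] hilt]
        exact List.getElem_mem hilt
      rw [take_any_eq (g.getD i []) W₀ (hlen _ hmem) (fun v => some v != bg)]
      rfl)]
  apply List.map_congr_left
  intro k _
  norm_num

theorem cols_with_eq (g : List (List Int)) (bg : Option Int) (W₀ : Nat) :
    (PySem.List.pyRange 0 (W₀ : Int) 1).filter (fun c =>
        g.any (fun row => some (PySem.List.pyGetD row c 0) != bg))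
      = (Cset g bg W₀).map (fun k : Nat => (k : Int)) := by
  rw [PySem.List.pyRange_zero_nat, List.filter_map]
  unfold Cset
  apply congrArg (List.map _)
  apply List.filter_congr
  intro c _
  simp only [Function.comp]
  unfold colFlag
  apply PySem.List.any_congr_mem
  intro row _
  rw [PySem.List.pyGetD_natCast, List.getD_eq_getElem?_getD]

theorem colsB_eq (g : List (List Int)) (mr xr mc xc : Nat)
    (hmr : mr ≤ xr) (hmc : mc ≤ xc) (hxr : xr < g.length)
    (hxc : ∀ row ∈ g, xc < row.length) :
    (PySem.List.pyRange 0
        ((((regionL g mr xr mc xc).getD 0 []).length : Nat) : Int) 1).map (fun c =>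
      (regionL g mr xr mc xc).map (fun row => PySem.List.pyGetD row c 0))
      = colsL g mr xr mc xc := by
  have hRlen : (regionL g mr xr mc xc).length = xr + 1 - mr := regionL_length g mr xr mc xc hxr
  have h0lt : 0 < (regionL g mr xr mc xc).length := by omega
  have hlen0 : ((regionL g mr xr mc xc).getD 0 []).length = xc + 1 - mc := by
    rw [List.getD_eq_getElem _ [] h0lt]
    rw [regionL_getElem g mr xr mc xc 0 hxr (by omega)]
    rw [List.length_take, List.length_drop]
    have hrow0 : xc < (g[mr + 0]'(by omega)).length := hxc _ (List.getElem_mem (by omega))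
    omega
  rw [hlen0, PySem.List.pyRange_zero_nat, List.map_map]
  unfold colsL
  apply List.map_congr_left
  intro c _
  simp only [Function.comp]
  apply List.map_congr_left
  intro row _
  rw [PySem.List.pyGetD_natCast, List.getD_eq_getElem?_getD]

-- `bordB s i b`: b is a border of the length-i prefix of s (pointwise, with getD defaults)
def bordB (s : List (List Int)) (i b : Nat) : Bool :=
  decide (b ≤ i) && (List.range b).all (fun j => s.getD j [] == s.getD (i - b + j) [])

-- longest proper border of the length-i prefix
def maxbord (s : List (List Int)) (i : Nat) : Nat :=
  Nat.findGreatest (fun b => bordB s i b = true) (i - 1)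


theorem bordB_iff (s : List (List Int)) (i b : Nat) :
    bordB s i b = true ↔ b ≤ i ∧ ∀ j < b, s.getD j [] = s.getD (i - b + j) [] := by
  simp [bordB]

theorem bord_zero (s : List (List Int)) (i : Nat) : bordB s i 0 = true := by
  simp [bordB]

theorem bord_down (s : List (List Int)) {i b c : Nat} (hb : bordB s i b = true)
    (hc : bordB s i c = true) (hcb : c ≤ b) : bordB s b c = true := by
  rw [bordB_iff] at *
  obtain ⟨hbi, hbp⟩ := hb
  obtain ⟨hci, hcp⟩ := hc
  refine ⟨hcb, fun j hj => ?_⟩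
  have h1 := hcp j hj
  have h2 := hbp (b - c + j) (by omega)
  rw [show i - b + (b - c + j) = i - c + j by omega] at h2
  rw [h1, ← h2]

theorem bord_up (s : List (List Int)) {i b c : Nat} (hb : bordB s i b = true)
    (hc : bordB s b c = true) : bordB s i c = true := by
  rw [bordB_iff] at *
  obtain ⟨hbi, hbp⟩ := hb
  obtain ⟨hcb, hcp⟩ := hc
  refine ⟨by omega, fun j hj => ?_⟩
  have h1 := hcp j hj
  have h2 := hbp (b - c + j) (by omega)
  rw [show i - b + (b - c + j) = i - c + j by omega] at h2
  rw [h1, h2]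

theorem bord_ext (s : List (List Int)) {i b : Nat} (hbi : b < i) :
    bordB s (i + 1) (b + 1) = true ↔ (bordB s i b = true ∧ s.getD i [] = s.getD b []) := by
  rw [bordB_iff, bordB_iff]
  constructor
  · rintro ⟨h1, h2⟩
    refine ⟨⟨by omega, fun j hj => ?_⟩, ?_⟩
    · have := h2 j (by omega)
      rwa [show i + 1 - (b + 1) + j = i - b + j by omega] at this
    · have := h2 b (by omega)
      rw [show i + 1 - (b + 1) + b = i by omega] at this
      exact this.symm
  · rintro ⟨⟨h1, h2⟩, h3⟩
    refine ⟨by omega, fun j hj => ?_⟩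
    rcases Nat.lt_or_ge j b with hjb | hjb
    · have := h2 j hjb
      rwa [show i + 1 - (b + 1) + j = i - b + j by omega]
    · have hjb' : j = b := by omega
      subst hjb'
      rw [show i + 1 - (j + 1) + j = i by omega]
      exact h3.symm

theorem maxbord_le (s : List (List Int)) (i : Nat) : maxbord s i ≤ i - 1 :=
  Nat.findGreatest_le _

theorem bord_maxbord (s : List (List Int)) (i : Nat) :
    bordB s i (maxbord s i) = true := by
  unfold maxbord
  exact Nat.findGreatest_spec (P := fun b => bordB s i b = true) (Nat.zero_le _) (bord_zero s i)

theorem le_maxbord (s : List (List Int)) {i b : Nat} (hb : bordB s i b = true)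
    (hbi : b ≤ i - 1) : b ≤ maxbord s i :=
  Nat.le_findGreatest hbi hb

theorem kmpAdjust_spec (s : List (List Int)) (fail : List Int) (i : Nat)
    (hfail : ∀ j : Nat, j + 1 < i → fail.getD j 0 = ((maxbord s (j + 1) : Nat) : Int)) :
    ∀ fuel kn, kn ≤ fuel → kn < i → bordB s i kn = true →
      ∃ rn : Nat, kmpAdjust s fail (i : Int) fuel (kn : Int) = (rn : Int) ∧
        bordB s i rn = true ∧ rn ≤ kn ∧
        (s.getD i [] = s.getD rn [] ∨ rn = 0) ∧
        (∀ b, bordB s i b = true → b ≤ kn → s.getD i [] = s.getD b [] → b ≤ rn) := by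
  intro fuel
  induction fuel with
  | zero =>
    intro kn hk hki hb
    have : kn = 0 := by omega
    subst this
    exact ⟨0, rfl, bord_zero s i, le_rfl, Or.inr rfl, fun b _ hb0 _ => hb0⟩
  | succ fuel ih =>
    intro kn hk hki hb
    rcases Nat.eq_zero_or_pos kn with h0 | hpos
    · subst h0
      refine ⟨0, ?_, bord_zero s i, le_rfl, Or.inr rfl, fun b _ hb0 _ => hb0⟩
      simp [kmpAdjust]
    · by_cases heq : s.getD i [] = s.getD kn []
      · refine ⟨kn, ?_, hb, le_rfl, Or.inl heq, fun b _ hbk _ => hbk⟩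
        have hcond : (((kn : Int) > 0 : Bool) && (PySem.List.pyGetD s (i : Int) [] != PySem.List.pyGetD s (kn : Int) [])) = false := by
          rw [PySem.List.pyGetD_natCast, PySem.List.pyGetD_natCast, heq]
          simp
        simp only [kmpAdjust, hcond, Bool.false_eq_true, reduceIte]
      · have hcond : (((kn : Int) > 0 : Bool) && (PySem.List.pyGetD s (i : Int) [] != PySem.List.pyGetD s (kn : Int) [])) = true := by
          rw [PySem.List.pyGetD_natCast, PySem.List.pyGetD_natCast]
          simp only [Bool.and_eq_true, decide_eq_true_eq, bne_iff_ne, ne_eq]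
          exact ⟨by exact_mod_cast hpos, heq⟩
      -- descend to maxbord s kn
        have hmlt : maxbord s kn ≤ kn - 1 := maxbord_le s kn
        have hidx : ((kn : Int) - 1) = ((kn - 1 : Nat) : Int) := by omega
        have hfv : PySem.List.pyGetD fail ((kn : Int) - 1) 0 = ((maxbord s kn : Nat) : Int) := by
          rw [hidx, PySem.List.pyGetD_natCast]
          have := hfail (kn - 1) (by omega)
          rwa [show kn - 1 + 1 = kn by omega] at this
        have hbm : bordB s i (maxbord s kn) = true := bord_up s hb (bord_maxbord s kn)
        obtain ⟨rn, hr1, hr2, hr3, hr4, hr5⟩ := ih (maxbord s kn) (by omega) (by omega) hbm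
        have hstep : kmpAdjust s fail (i : Int) (fuel + 1) (kn : Int) = (rn : Int) := by
          simp only [kmpAdjust, hcond, if_pos]
          rw [hfv, hr1]
        refine ⟨rn, hstep, hr2, by omega, hr4, ?_⟩
        intro b hbb hbk hbe
        have hbne : b ≠ kn := fun h => heq (h ▸ hbe)
        have : bordB s kn b = true := bord_down s hb hbb (by omega)
        exact hr5 b hbb (le_maxbord s this (by omega)) hbe

theorem kmpStep_eq (s : List (List Int)) (fail : List Int) (i : Nat) (hi : 1 ≤ i)
    (hfail : ∀ j : Nat, j + 1 ≤ i → fail.getD j 0 = ((maxbord s (j + 1) : Nat) : Int)) :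
    (if PySem.List.pyGetD s (i : Int) [] ==
        PySem.List.pyGetD s (kmpAdjust s fail (i : Int) (maxbord s i) ((maxbord s i : Nat) : Int)) []
     then kmpAdjust s fail (i : Int) (maxbord s i) ((maxbord s i : Nat) : Int) + 1
     else kmpAdjust s fail (i : Int) (maxbord s i) ((maxbord s i : Nat) : Int))
    = ((maxbord s (i + 1) : Nat) : Int) := by
  have hmi : maxbord s i ≤ i - 1 := maxbord_le s i
  obtain ⟨rn, hr1, hr2, hr3, hr4, hr5⟩ :=
    kmpAdjust_spec s fail i (fun j hj => hfail j (by omega)) (maxbord s i) (maxbord s i)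
      le_rfl (by omega) (bord_maxbord s i)
  have hrni : rn < i := by omega
  rw [hr1, PySem.List.pyGetD_natCast, PySem.List.pyGetD_natCast]
  by_cases heq : s.getD i [] = s.getD rn []
  · rw [if_pos (by simpa using heq)]
    have hmb : maxbord s (i + 1) = rn + 1 := by
      unfold maxbord
      rw [Nat.findGreatest_eq_iff]
      refine ⟨by omega, fun _ => (bord_ext s hrni).mpr ⟨hr2, heq⟩, ?_⟩
      intro m hm hmle hP
      obtain ⟨b, rfl⟩ : ∃ b, m = b + 1 := ⟨m - 1, by omega⟩
      have hbi : b < i := by omega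
      obtain ⟨hbb, hbe⟩ := (bord_ext s hbi).mp hP
      have hbk : b ≤ maxbord s i := le_maxbord s hbb (by omega)
      have := hr5 b hbb hbk hbe
      omega
    rw [hmb]
    push_cast
    ring
  · rw [if_neg (by simpa using heq)]
    have hrn0 : rn = 0 := by
      rcases hr4 with h | h
      · exact absurd h heq
      · exact h
    subst hrn0
    have hmb : maxbord s (i + 1) = 0 := by
      unfold maxbord
      rw [Nat.findGreatest_eq_iff]
      refine ⟨by omega, fun h => absurd rfl h, ?_⟩
      intro m hm hmle hP
      obtain ⟨b, rfl⟩ : ∃ b, m = b + 1 := ⟨m - 1, by omega⟩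
      have hbi : b < i := by omega
      obtain ⟨hbb, hbe⟩ := (bord_ext s hbi).mp hP
      have hbk : b ≤ maxbord s i := le_maxbord s hbb (by omega)
      have hb0 : b ≤ 0 := hr5 b hbb hbk hbe
      have hb0' : b = 0 := by omega
      subst hb0'
      exact heq hbe
    rw [hmb]

-- the state of _min_period's for-loop after m iterations
def kmpGo (s : List (List Int)) (m : Nat) : List Int × Int :=
  (List.range m).foldl (fun (st : List Int × Int) (km : Nat) =>
      let i : Int := 1 + (km : Int)
      let k1 := kmpAdjust s st.1 i st.2.toNat st.2
      let k2 := if PySem.List.pyGetD s i [] == PySem.List.pyGetD s k1 [] then k1 + 1 else k1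
      (st.1 ++ [k2], k2)) ([0], 0)

theorem kmpGo_succ (s : List (List Int)) (m : Nat) :
    kmpGo s (m + 1) =
      (let st := kmpGo s m
       let i : Int := 1 + (m : Int)
       let k1 := kmpAdjust s st.1 i st.2.toNat st.2
       let k2 := if PySem.List.pyGetD s i [] == PySem.List.pyGetD s k1 [] then k1 + 1 else k1
       (st.1 ++ [k2], k2)) := by
  unfold kmpGo
  rw [List.range_succ, List.foldl_append]
  rfl

theorem kmpFold (s : List (List Int)) : ∀ m : Nat,
    (kmpGo s m).1.length = m + 1 ∧
    (∀ j ≤ m, (kmpGo s m).1.getD j 0 = ((maxbord s (j + 1) : Nat) : Int)) ∧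
    (kmpGo s m).2 = ((maxbord s (m + 1) : Nat) : Int) := by
  intro m
  induction m with
  | zero =>
    refine ⟨rfl, ?_, ?_⟩
    · intro j hj
      interval_cases j
      rfl
    · rfl
  | succ m ih =>
    obtain ⟨hlen, hget, hsnd⟩ := ih
    have hcast : (1 + (m : Int)) = ((m + 1 : Nat) : Int) := by push_cast; ring
    have hk2 : (if PySem.List.pyGetD s (1 + (m : Int)) [] ==
          PySem.List.pyGetD s (kmpAdjust s (kmpGo s m).1 (1 + (m : Int)) (kmpGo s m).2.toNat (kmpGo s m).2) []
        then kmpAdjust s (kmpGo s m).1 (1 + (m : Int)) (kmpGo s m).2.toNat (kmpGo s m).2 + 1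
        else kmpAdjust s (kmpGo s m).1 (1 + (m : Int)) (kmpGo s m).2.toNat (kmpGo s m).2)
        = ((maxbord s (m + 2) : Nat) : Int) := by
      rw [hcast, hsnd, Int.toNat_natCast]
      have := kmpStep_eq s (kmpGo s m).1 (m + 1) (by omega) (fun j hj => hget j (by omega))
      simpa using this
    rw [kmpGo_succ]
    simp only
    refine ⟨?_, ?_, ?_⟩
    · rw [List.length_append, hlen]
      rfl
    · intro j hj
      rcases Nat.lt_or_ge j (m + 1) with hlt | hge
      · rw [List.getD_append _ _ _ j (by omega), hget j (by omega)]
      · have hje : j = m + 1 := by omega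
        subst hje
        rw [List.getD_append_right _ _ _ _ (by omega), hlen]
        simp only [Nat.sub_self, List.getD_cons_zero]
        rw [hk2]
    · rw [hk2]

theorem minPeriodOf_eq (s : List (List Int)) (hs : s ≠ []) :
    minPeriodOf s = ((s.length - maxbord s s.length : Nat) : Int) := by
  have hpos : 1 ≤ s.length := List.length_pos_of_ne_nil hs
  simp only [minPeriodOf, PySem.List.len_eq]
  have hgo : (PySem.List.pyRange 1 (s.length : Int) 1).foldl (fun (st : List Int × Int) i =>
      let k1 := kmpAdjust s st.1 i st.2.toNat st.2
      let k2 := if PySem.List.pyGetD s i [] == PySem.List.pyGetD s k1 [] then k1 + 1 else k1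
      (st.1 ++ [k2], k2)) ([0], 0) = kmpGo s (s.length - 1) := by
    rw [PySem.List.pyRange_one, List.foldl_map,
        show ((s.length : Int) - 1).toNat = s.length - 1 by omega]
    rfl
  rw [hgo]
  obtain ⟨hlen, hget, _⟩ := kmpFold s (s.length - 1)
  rw [show (s.length : Int) - 1 = ((s.length - 1 : Nat) : Int) by omega,
      PySem.List.pyGetD_natCast, List.getD_eq_getElem?_getD] at *
  rw [← List.getD_eq_getElem?_getD, hget (s.length - 1) le_rfl,
      show s.length - 1 + 1 = s.length by omega]
  have := maxbord_le s s.length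
  omega

theorem find?_pyRange_first (a b m : Int) (Q : Int → Bool) (ham : a ≤ m) (hmb : m < b)
    (hQm : Q m = true) (hlt : ∀ x, a ≤ x → x < m → Q x = false) :
    (PySem.List.pyRange a b 1).find? Q = some m := by
  rw [PySem.List.pyRange_one_append a m b ham (by omega), List.find?_append]
  have h1 : (PySem.List.pyRange a m 1).find? Q = none := by
    rw [List.find?_eq_none]
    intro x hx
    have hm := PySem.List.mem_pyRange_one.mp hx
    simp [hlt x hm.1 hm.2]
  rw [h1, PySem.List.pyRange_one_cons (by omega : m < b)]
  simp [hQm]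

theorem periodFind (s : List (List Int)) (n : Nat) (hn : 1 ≤ n) (Q : Int → Bool)
    (hQ : ∀ q : Nat, 1 ≤ q → q ≤ n → Q (q : Int) = bordB s n (n - q)) :
    (PySem.List.pyRange 1 ((n : Int) + 1) 1).find? Q = some ((n - maxbord s n : Nat) : Int) := by
  have hmle : maxbord s n ≤ n - 1 := maxbord_le s n
  apply find?_pyRange_first
  · omega
  · omega
  · rw [hQ (n - maxbord s n) (by omega) (by omega),
        show n - (n - maxbord s n) = maxbord s n by omega]
    exact bord_maxbord s n
  · intro x h1 hx
    have hq : x = ((x.toNat : Nat) : Int) := by omega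
    rw [hq, hQ x.toNat (by omega) (by omega)]
    cases hb : bordB s n (n - x.toNat) with
    | false => rfl
    | true =>
      exfalso
      have := le_maxbord s hb (by omega)
      omega



-- A's cell-by-cell shift test for the rows is the border test on the region's row list
theorem condA_row (g : List (List Int)) (mr xr mc xc q : Nat)
    (hq1 : 1 ≤ q) (hqn : q ≤ xr + 1 - mr) (hmr : mr ≤ xr) (hmc : mc ≤ xc)
    (hxr : xr < g.length) (hxc : ∀ row ∈ g, xc < row.length) :
    ((PySem.List.pyRange (mr : Int) ((xr : Int) + 1 - (q : Int)) 1).all (fun r =>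
       (PySem.List.pyRange (mc : Int) ((xc : Int) + 1) 1).all (fun c =>
         PySem.List.pyGetD (PySem.List.pyGetD g r []) c 0 ==
         PySem.List.pyGetD (PySem.List.pyGetD g (r + (q : Int)) []) c 0)))
    = bordB (regionL g mr xr mc xc) (xr + 1 - mr) (xr + 1 - mr - q) := by
  have hRlen : (regionL g mr xr mc xc).length = xr + 1 - mr := regionL_length g mr xr mc xc hxr
  rw [Bool.eq_iff_iff, matchA_row_iff g mr xr mc xc q hq1 hqn hmr hmc, bordB_iff]
  have hrowlen : ∀ j (hj : j < xr + 1 - mr), xc < (g[mr + j]'(by omega)).length :=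
    fun j hj => hxc _ (List.getElem_mem (by omega))
  constructor
  · intro h
    refine ⟨by omega, fun j hj => ?_⟩
    rw [show xr + 1 - mr - (xr + 1 - mr - q) + j = q + j by omega]
    rw [List.getD_eq_getElem _ [] (by omega : j < (regionL g mr xr mc xc).length),
        List.getD_eq_getElem _ [] (by omega : q + j < (regionL g mr xr mc xc).length)]
    rw [regionL_getElem g mr xr mc xc j hxr (by omega),
        regionL_getElem g mr xr mc xc (q + j) hxr (by omega)]
    apply (rowslice_eq_iff _ _ mc xc hmc (hrowlen j (by omega)) (hrowlen (q + j) (by omega))).mpr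
    intro c hc
    have h1 := h j (by omega) c hc
    unfold cellOf at h1
    rw [List.getD_eq_getElem g [] (show mr + j < g.length by omega),
        List.getD_eq_getElem g [] (show mr + j + q < g.length by omega)] at h1
    have hgg : g[mr + j + q]'(by omega) = g[mr + (q + j)]'(by omega) :=
      getElem_congr rfl (by omega) (by omega)
    rw [hgg] at h1
    exact h1
  · rintro ⟨-, h⟩
    intro i hi c hc
    have h1 := h i (by omega)
    rw [show xr + 1 - mr - (xr + 1 - mr - q) + i = q + i by omega] at h1
    rw [List.getD_eq_getElem _ [] (by omega : i < (regionL g mr xr mc xc).length),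
        List.getD_eq_getElem _ [] (by omega : q + i < (regionL g mr xr mc xc).length)] at h1
    rw [regionL_getElem g mr xr mc xc i hxr (by omega),
        regionL_getElem g mr xr mc xc (q + i) hxr (by omega)] at h1
    have h2 := (rowslice_eq_iff _ _ mc xc hmc (hrowlen i (by omega))
        (hrowlen (q + i) (by omega))).mp h1 c hc
    unfold cellOf
    rw [List.getD_eq_getElem g [] (show mr + i < g.length by omega),
        List.getD_eq_getElem g [] (show mr + i + q < g.length by omega)]
    have hgg : g[mr + i + q]'(by omega) = g[mr + (q + i)]'(by omega) :=
      getElem_congr rfl (by omega) (by omega)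
    rw [hgg]
    exact h2

-- A's cell-by-cell shift test for the columns is the border test on the column list
theorem condA_col (g : List (List Int)) (mr xr mc xc q : Nat)
    (hq1 : 1 ≤ q) (hqn : q ≤ xc + 1 - mc) (hmr : mr ≤ xr) (hmc : mc ≤ xc)
    (hxr : xr < g.length) (hxc : ∀ row ∈ g, xc < row.length) :
    ((PySem.List.pyRange (mr : Int) ((xr : Int) + 1) 1).all (fun r =>
       (PySem.List.pyRange (mc : Int) ((xc : Int) + 1 - (q : Int)) 1).all (fun c =>
         PySem.List.pyGetD (PySem.List.pyGetD g r []) c 0 ==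
         PySem.List.pyGetD (PySem.List.pyGetD g r []) (c + (q : Int)) 0)))
    = bordB (colsL g mr xr mc xc) (xc + 1 - mc) (xc + 1 - mc - q) := by
  have hClen : (colsL g mr xr mc xc).length = xc + 1 - mc := colsL_length g mr xr mc xc
  rw [Bool.eq_iff_iff, matchA_col_iff g mr xr mc xc q hq1 hqn hmr hmc, bordB_iff]
  constructor
  · intro h
    refine ⟨by omega, fun j hj => ?_⟩
    rw [show xc + 1 - mc - (xc + 1 - mc - q) + j = q + j by omega]
    rw [List.getD_eq_getElem _ [] (by omega : j < (colsL g mr xr mc xc).length),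
        List.getD_eq_getElem _ [] (by omega : q + j < (colsL g mr xr mc xc).length)]
    apply (colsL_eq_iff g mr xr mc xc j (q + j) (by omega) (by omega) hmr hmc hxr hxc).mpr
    intro r hr
    have h1 := h r hr j (by omega)
    rw [show mc + (q + j) = mc + j + q by omega]
    exact h1
  · rintro ⟨-, h⟩
    intro r hr j hj
    have h1 := h j (by omega)
    rw [show xc + 1 - mc - (xc + 1 - mc - q) + j = q + j by omega] at h1
    rw [List.getD_eq_getElem _ [] (by omega : j < (colsL g mr xr mc xc).length),
        List.getD_eq_getElem _ [] (by omega : q + j < (colsL g mr xr mc xc).length)] at h1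
    have h2 := (colsL_eq_iff g mr xr mc xc j (q + j) (by omega) (by omega) hmr hmc hxr hxc).mp h1 r hr
    rw [show mc + (q + j) = mc + j + q by omega] at h2
    exact h2

-- A's per-cell modular indexing of the tile is B's lookup in the precomputed phase rows
theorem out_eq (tile : List (List Int)) (th tw H W : Nat) (shift : Int)
    (hlen : tile.length = th) (h1 : 1 ≤ th)
    (hrow : ∀ row ∈ tile, row.length = tw) (h2 : 1 ≤ tw) :
    (PySem.List.pyRange 0 (H : Int) 1).map (fun r =>
       (PySem.List.pyRange 0 (W : Int) 1).map (fun c =>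
         PySem.List.pyGetD (PySem.List.pyGetD tile (PySem.Int.mod (r + shift) (th : Int)) [])
           (PySem.Int.mod (c + 0) (tw : Int)) 0))
    = (PySem.List.pyRange 0 (H : Int) 1).map (fun r =>
       PySem.List.pyGetD (tile.map (fun trow =>
         PySem.List.slice (PySem.List.pyRepeat trow (PySem.Int.floordiv (W : Int) (tw : Int) + 1))
           none (some (W : Int)))) (PySem.Int.mod (r + shift) (th : Int)) []) := by
  apply List.map_congr_left
  intro r _
  have hthpos : (0 : Int) < (th : Int) := by exact_mod_cast h1
  have hge : 0 ≤ PySem.Int.mod (r + shift) (th : Int) := PySem.Int.mod_nonneg _ hthpos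
  have hlt : PySem.Int.mod (r + shift) (th : Int) < (th : Int) := PySem.Int.mod_lt _ hthpos
  have hidxn : PySem.Int.mod (r + shift) (th : Int)
      = (((PySem.Int.mod (r + shift) (th : Int)).toNat : Nat) : Int) := by omega
  rw [hidxn, PySem.List.pyGetD_natCast, PySem.List.pyGetD_natCast]
  have hm : (PySem.Int.mod (r + shift) (th : Int)).toNat < tile.length := by omega
  rw [List.getD_eq_getElem _ [] hm,
      List.getD_eq_getElem _ [] (by rw [List.length_map]; omega), List.getElem_map]
  exact out_row_eq _ W tw (hrow _ (List.getElem_mem hm)) h2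


-- ===== VERDICT (by name: the statement is the Claim_ definition above) =====
theorem transform_spec : Claim_equal_transform := by
  intro g _hDom hPre
  obtain ⟨hgne, hW0pos, hlen, hex⟩ := hPre
  have hhd : g.headD [] = g.getD 0 [] := headD_getD g []
  rw [hhd] at hW0pos hlen hex
  rw [pvBg_eq g] at hex
  set W₀ := (g.getD 0 []).length with hW₀
  have hexrow : ∃ r, r ∈ Rset g (bgA g) W₀ := by
    rcases List.any_eq_true.mp hex with ⟨row, hrow, hrt⟩
    rcases List.mem_iff_getElem.mp hrow with ⟨r, hr, hre⟩
    refine ⟨r, List.mem_filter.mpr ⟨List.mem_range.mpr hr, ?_⟩⟩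
    rw [List.getD_eq_getElem g [] hr, hre]
    unfold rowFlag
    rw [← take_any_eq row W₀ (hlen row hrow) (fun v => some v != bgA g)]
    exact hrt
  obtain ⟨r0, hr0⟩ := hexrow
  have hRne : Rset g (bgA g) W₀ ≠ [] := List.ne_nil_of_mem hr0
  have hr0lt : r0 < g.length := List.mem_range.mp (List.mem_filter.mp hr0).1
  have hCne : Cset g (bgA g) W₀ ≠ [] := by
    have hflag := (List.mem_filter.mp hr0).2
    unfold rowFlag at hflag
    rcases List.any_eq_true.mp hflag with ⟨c, hc, hcf⟩
    refine List.ne_nil_of_mem (List.mem_filter.mpr ⟨hc, List.any_eq_true.mpr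
      ⟨g.getD r0 [], ?_, hcf⟩⟩)
    rw [List.getD_eq_getElem g [] hr0lt]
    exact List.getElem_mem hr0lt
  set mr := (Rset g (bgA g) W₀).head hRne with hmr
  set xr := (Rset g (bgA g) W₀).getLast hRne with hxr
  set mc := (Cset g (bgA g) W₀).head hCne with hmc
  set xc := (Cset g (bgA g) W₀).getLast hCne with hxc
  have hsR : (Rset g (bgA g) W₀).Pairwise (· < ·) := List.Pairwise.filter _ List.pairwise_lt_range
  have hsC : (Cset g (bgA g) W₀).Pairwise (· < ·) := List.Pairwise.filter _ List.pairwise_lt_range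
  have hmrxr : mr ≤ xr := getLast_max hsR hRne _ (List.head_mem hRne)
  have hmcxc : mc ≤ xc := getLast_max hsC hCne _ (List.head_mem hCne)
  have hxrlt : xr < g.length := List.mem_range.mp (List.mem_filter.mp (List.getLast_mem hRne)).1
  have hxclt : xc < W₀ := List.mem_range.mp (List.mem_filter.mp (List.getLast_mem hCne)).1
  have hxcrow : ∀ row ∈ g, xc < row.length := fun row h => lt_of_lt_of_le hxclt (hlen row h)
  unfold Spec_transform
  have hb : boundsA g (bgA g)
      = ((((Rset g (bgA g) W₀).head hRne : Nat) : Int),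
         (((Rset g (bgA g) W₀).getLast hRne : Nat) : Int),
         (((Cset g (bgA g) W₀).head hCne : Nat) : Int),
         (((Cset g (bgA g) W₀).getLast hCne : Nat) : Int)) :=
    boundsA_eq g (bgA g) hRne hCne
  show transform g = transform_alt g
  simp only [transform, transform_alt, bgB_eq, hb]
  simp only [PySem.List.len_eq, PySem.List.pyGetD_zero]
  rw [show (((g.getD 0 []).length : Nat) : Int) = ((W₀ : Nat) : Int) by rw [hW₀]]
  rw [rows_with_eq g (bgA g) W₀ hlen]
  rw [map_cast_getD_zero _ hRne, map_cast_pyGetD_neg_one _ hRne]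
  rw [cols_with_eq g (bgA g) W₀]
  rw [map_cast_getD_zero _ hCne, map_cast_pyGetD_neg_one _ hCne]
  rw [← hmr, ← hxr, ← hmc, ← hxc]
  have hregion : (PySem.List.slice g (some (mr : Int)) (some ((xr : Int) + 1))).map (fun row =>
      PySem.List.slice row (some (mc : Int)) (some ((xc : Int) + 1))) = regionL g mr xr mc xc := by
    rw [show ((xr : Int) + 1) = ((xr + 1 : Nat) : Int) by push_cast; ring,
        show ((xc : Int) + 1) = ((xc + 1 : Nat) : Int) by push_cast; ring,
        PySem.List.slice_natCast]
    unfold regionL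
    apply List.map_congr_left
    intro row _
    rw [PySem.List.slice_natCast]
  rw [hregion]
  rw [colsB_eq g mr xr mc xc hmrxr hmcxc hxrlt hxcrow]
  have hRlen : (regionL g mr xr mc xc).length = xr + 1 - mr := regionL_length g mr xr mc xc hxrlt
  have hCLen : (colsL g mr xr mc xc).length = xc + 1 - mc := colsL_length g mr xr mc xc
  -- both period searches compute length minus the longest proper border
  rw [show ((xr : Int) - (mr : Int) + 2) = (((xr + 1 - mr : Nat) : Int) + 1) by omega]
  rw [periodFind (regionL g mr xr mc xc) (xr + 1 - mr) (by omega) _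
        (fun q h1 h2 => condA_row g mr xr mc xc q h1 h2 hmrxr hmcxc hxrlt hxcrow)]
  rw [show ((xc : Int) - (mc : Int) + 2) = (((xc + 1 - mc : Nat) : Int) + 1) by omega]
  rw [periodFind (colsL g mr xr mc xc) (xc + 1 - mc) (by omega) _
        (fun q h1 h2 => condA_col g mr xr mc xc q h1 h2 hmrxr hmcxc hxrlt hxcrow)]
  rw [Option.getD_some, Option.getD_some]
  have hRnil : regionL g mr xr mc xc ≠ [] := by
    intro h
    rw [h] at hRlen
    simp at hRlen
    omega
  have hCnil : colsL g mr xr mc xc ≠ [] := by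
    intro h
    rw [h] at hCLen
    simp at hCLen
    omega
  rw [minPeriodOf_eq _ hRnil, minPeriodOf_eq _ hCnil, hRlen, hCLen]
  have hmbR := maxbord_le (regionL g mr xr mc xc) (xr + 1 - mr)
  have hmbC := maxbord_le (colsL g mr xr mc xc) (xc + 1 - mc)
  rw [tileA_eq g mr xr mc xc
        (xr + 1 - mr - maxbord (regionL g mr xr mc xc) (xr + 1 - mr))
        (xc + 1 - mc - maxbord (colsL g mr xr mc xc) (xc + 1 - mc))
        hmrxr hmcxc hxrlt hxcrow (by omega) (by omega)]
  have hrowlenW : ∀ row ∈ regionL g mr xr mc xc, row.length = xc + 1 - mc := by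
    intro row hrow
    rcases List.mem_map.mp hrow with ⟨row0, hrow0, hre⟩
    have hrow0g : row0 ∈ g := List.mem_of_mem_drop (List.mem_of_mem_take hrow0)
    rw [← hre, List.length_take, List.length_drop]
    have := hxcrow row0 hrow0g
    omega
  apply out_eq
  · rw [List.length_map, PySem.List.slice_to_natCast, List.length_take, hRlen]
    omega
  · omega
  · intro row hrow
    rcases List.mem_map.mp hrow with ⟨row0, hrow0, hre⟩
    rw [PySem.List.slice_to_natCast] at hrow0
    have hrow0R : row0 ∈ regionL g mr xr mc xc := List.mem_of_mem_take hrow0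
    rw [← hre, PySem.List.slice_to_natCast, List.length_take, hrowlenW row0 hrow0R]
    omega
  · omega
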